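-- pv_equiv track=rewrite | github.com/a171240/gzh-xhs | 06-工具/scripts/adapters/xhs/security_guard.py | _host_allowed
-- ===== SOURCE A (Python) =====
-- from typing import Iterable
--
-- def _host_allowed(host: str, allowlist: Iterable[str]) -> bool:
--     host_l = host.casefold()
--     patterns = [str(item or "").strip().casefold() for item in allowlist if str(item or "").strip()]
--     if not patterns:
--         return True
--     for item in patterns:
--         if item.startswith("*."):
--             suffix = item[2:]
--             if host_l == suffix or host_l.endswith(f".{suffix}"):
--                 return True
--         elif host_l == item:
--             return True
--     return False
-- ===== SOURCE B (Python) =====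
-- def _host_allowed(host, allowlist):
--     host_l = host.casefold()
--     pats = {str(item or "").strip().casefold() for item in allowlist}
--     pats.discard("")
--     if not pats:
--         return True
--     if host_l in pats or "*." + host_l in pats:
--         return True
--     return any("*." + host_l[i + 1:] in pats
--                for i, c in enumerate(host_l) if c == ".")
-- ===== Notes on version B (the rewrite author's own statement) =====
-- stated objective: alternative
-- what changed: B inverts the iteration: it builds one set of all normalized patterns and then, instead of scanning the pattern list with wildcard/exact branching, looks up the host itself, '*.'+host, and '*.'+(each after-dot suffix of the host) in that set, so the per-pattern endswith scan disappears.
import Mathlib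
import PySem

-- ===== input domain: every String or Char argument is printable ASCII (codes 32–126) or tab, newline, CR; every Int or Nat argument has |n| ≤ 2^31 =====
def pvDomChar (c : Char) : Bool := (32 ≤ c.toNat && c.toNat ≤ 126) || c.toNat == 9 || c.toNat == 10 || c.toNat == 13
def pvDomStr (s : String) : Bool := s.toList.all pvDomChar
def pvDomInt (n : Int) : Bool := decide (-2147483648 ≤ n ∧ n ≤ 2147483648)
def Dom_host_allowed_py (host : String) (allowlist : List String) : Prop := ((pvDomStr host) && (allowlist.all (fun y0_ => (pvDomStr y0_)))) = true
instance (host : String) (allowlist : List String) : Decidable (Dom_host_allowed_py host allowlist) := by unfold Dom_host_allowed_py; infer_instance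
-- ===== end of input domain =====

-- B inverts the iteration: it builds one set of the normalized patterns and probes it with
-- the host's candidate keys (host, '*.'+host, '*.'+each after-dot suffix of the host),
-- instead of A's wildcard/exact branching scan over the pattern list (objective: alternative).

-- ===== PORT A =====
-- casefold on the ASCII domain is lower; strings handled as List Char via PySem.Chars.
def host_allowed_py (host : String) (allowlist : List String) : Bool :=
  let host_l := PySem.Chars.lower host.toList
  let patterns := allowlist.foldl
    (fun acc item =>
      if PySem.Chars.strip item.toList ≠ [] then
        acc ++ [PySem.Chars.lower (PySem.Chars.strip item.toList)]
      else acc) []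
  if patterns = [] then true
  else patterns.any (fun item =>
    if PySem.Chars.startswith item ['*', '.'] then
      let suffix := PySem.List.slice item (some 2) none
      host_l == suffix || PySem.Chars.endswith host_l ('.' :: suffix)
    else host_l == item)

-- ===== PORT B =====
def host_allowed_py_alt (host : String) (allowlist : List String) : Bool :=
  let host_l := PySem.Chars.lower host.toList
  let pats := PySem.Set.discard
    (PySem.Set.ofList (allowlist.map (fun item => PySem.Chars.lower (PySem.Chars.strip item.toList)))) []
  if pats.isEmpty then true
  else if PySem.Set.contains pats host_l || PySem.Set.contains pats ('*' :: '.' :: host_l) then true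
  else (PySem.List.enumerate host_l).any (fun ic =>
    ic.2 == '.' && PySem.Set.contains pats ('*' :: '.' :: PySem.List.slice host_l (some (ic.1 + 1)) none))

-- ===== PRECONDITION & SPEC =====
def Spec_host_allowed_py (host : String) (allowlist : List String) (out : Bool) : Prop := out = host_allowed_py_alt host allowlist
instance (host : String) (allowlist : List String) (out : Bool) : Decidable (Spec_host_allowed_py host allowlist out) := by unfold Spec_host_allowed_py; infer_instance

-- ===== CLAIM (what is proved, stated in full; the proofs are below) =====
def Claim_equal_host_allowed_py : Prop := ∀ (host : String) (allowlist : List String), Dom_host_allowed_py host allowlist → Spec_host_allowed_py host allowlist (host_allowed_py host allowlist)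

-- ===== LEMMAS AND PROOFS =====

-- the normalized nonempty pattern list A traverses
def pvNorm (allowlist : List String) : List (List Char) :=
  allowlist.filterMap (fun it =>
    if PySem.Chars.strip it.toList = [] then none
    else some (PySem.Chars.lower (PySem.Chars.strip it.toList)))

lemma pv_lower_eq_nil (x : List Char) : (PySem.Chars.lower x = []) ↔ x = [] := by
  simp [PySem.Chars.lower]

lemma pvA_fold (l : List String) (acc : List (List Char)) :
    l.foldl (fun acc item =>
      if PySem.Chars.strip item.toList ≠ [] then
        acc ++ [PySem.Chars.lower (PySem.Chars.strip item.toList)]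
      else acc) acc = acc ++ pvNorm l := by
  induction l generalizing acc with
  | nil => simp [pvNorm]
  | cons a t ih =>
    rw [List.foldl_cons]
    by_cases h : PySem.Chars.strip a.toList = []
    · rw [if_neg (by simp [h]), ih]
      simp [pvNorm, h]
    · rw [if_pos h, ih]
      simp [pvNorm, h]

-- membership in B's set is membership in A's normalized pattern list
lemma pv_mem_pats (allowlist : List String) (x : List Char) :
    (x ∈ PySem.Set.discard
      (PySem.Set.ofList (allowlist.map (fun item => PySem.Chars.lower (PySem.Chars.strip item.toList)))) [])
    ↔ x ∈ pvNorm allowlist := by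
  rw [PySem.Set.mem_discard, PySem.Set.mem_ofList]
  simp only [List.mem_map, pvNorm, List.mem_filterMap]
  constructor
  · rintro ⟨⟨it, hit, rfl⟩, hne⟩
    refine ⟨it, hit, ?_⟩
    rw [if_neg (fun hc => hne (by simp [hc, PySem.Chars.lower]))]
  · rintro ⟨it, hit, hx⟩
    by_cases hs : PySem.Chars.strip it.toList = []
    · simp [hs] at hx
    · rw [if_neg hs] at hx
      cases hx
      exact ⟨⟨it, hit, rfl⟩, fun hc => hs ((pv_lower_eq_nil _).mp hc)⟩

-- a '.'-headed suffix of h is exactly what follows some '.' inside h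
lemma pv_dot_suffix_iff (h s : List Char) :
    ('.' :: s) <:+ h ↔ ∃ i : Nat, i < h.length ∧ h[i]? = some '.' ∧ h.drop (i + 1) = s := by
  constructor
  · rintro ⟨pre, rfl⟩
    exact ⟨pre.length, by simp, by simp, by simp [List.drop_append]⟩
  · rintro ⟨i, hi, hget, hdrop⟩
    refine ⟨h.take i, ?_⟩
    rw [List.getElem?_eq_getElem hi, Option.some.injEq] at hget
    conv_rhs => rw [← List.take_append_drop i h, List.drop_eq_getElem_cons hi]
    rw [hget, hdrop]

lemma pv_slice_two (p : List Char) : PySem.List.slice p (some 2) none = p.drop 2 := by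
  rw [show (2:Int) = ((2:Nat):Int) from rfl, PySem.List.slice_from_natCast]

lemma pv_star_iff (p : List Char) :
    PySem.Chars.startswith p ['*', '.'] = true ↔ ∃ t, p = '*' :: '.' :: t := by
  rw [PySem.Chars.startswith_iff]
  constructor
  · rintro ⟨t, rfl⟩; exact ⟨t, rfl⟩
  · rintro ⟨t, rfl⟩; exact ⟨t, rfl⟩

-- the central inversion: A's per-pattern match ↔ B's per-candidate lookup
lemma pv_core (h : List Char) (N : List (List Char)) :
    (∃ p ∈ N, (if PySem.Chars.startswith p ['*', '.'] = true
        then (h = p.drop 2 ∨ ('.' :: p.drop 2) <:+ h)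
        else h = p))
    ↔ (h ∈ N ∨ ('*' :: '.' :: h) ∈ N ∨
        ∃ i : Nat, i < h.length ∧ h[i]? = some '.' ∧ ('*' :: '.' :: h.drop (i + 1)) ∈ N) := by
  constructor
  · rintro ⟨p, hp, hm⟩
    by_cases hs : PySem.Chars.startswith p ['*', '.'] = true
    · rw [if_pos hs] at hm
      obtain ⟨t, rfl⟩ := (pv_star_iff p).mp hs
      simp only [List.drop_succ_cons, List.drop_zero] at hm
      rcases hm with rfl | hsuf
      · exact Or.inr (Or.inl hp)
      · obtain ⟨i, hi, hget, hdrop⟩ := (pv_dot_suffix_iff h t).mp hsuf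
        exact Or.inr (Or.inr ⟨i, hi, hget, by rw [hdrop]; exact hp⟩)
    · rw [if_neg hs] at hm
      exact Or.inl (hm ▸ hp)
  · rintro (hmem | hmem | ⟨i, hi, hget, hmem⟩)
    · refine ⟨h, hmem, ?_⟩
      by_cases hs : PySem.Chars.startswith h ['*', '.'] = true
      · rw [if_pos hs]
        obtain ⟨t, rfl⟩ := (pv_star_iff h).mp hs
        exact Or.inr ⟨['*'], rfl⟩
      · rw [if_neg hs]
    · refine ⟨'*' :: '.' :: h, hmem, ?_⟩
      rw [if_pos ((pv_star_iff _).mpr ⟨h, rfl⟩)]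
      exact Or.inl (by simp)
    · refine ⟨'*' :: '.' :: h.drop (i + 1), hmem, ?_⟩
      rw [if_pos ((pv_star_iff _).mpr ⟨_, rfl⟩)]
      refine Or.inr ?_
      simp only [List.drop_succ_cons, List.drop_zero]
      exact (pv_dot_suffix_iff h _).mpr ⟨i, hi, hget, rfl⟩

-- B's suffix scan, read as an existential over dot positions
lemma pv_enum_any (h : List Char) (P : List Char → Bool) :
    ((PySem.List.enumerate h).any (fun ic =>
        ic.2 == '.' && P ('*' :: '.' :: PySem.List.slice h (some (ic.1 + 1)) none)) = true)
    ↔ ∃ i : Nat, i < h.length ∧ h[i]? = some '.' ∧ P ('*' :: '.' :: h.drop (i + 1)) = true := by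
  simp only [List.any_eq_true, Bool.and_eq_true, beq_iff_eq]
  constructor
  · rintro ⟨ic, hic, hdot, hP⟩
    obtain ⟨k, hk, rfl⟩ := (PySem.List.mem_enumerate_iff _ _ _).mp hic
    simp only [zero_add] at hdot hP
    have hcast : ((k : Int) + 1) = ((k + 1 : Nat) : Int) := by push_cast; ring
    rw [hcast, PySem.List.slice_from_natCast] at hP
    exact ⟨k, hk, by rw [List.getElem?_eq_getElem hk, hdot], hP⟩
  · rintro ⟨i, hi, hget, hP⟩
    rw [List.getElem?_eq_getElem hi, Option.some.injEq] at hget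
    refine ⟨((i : Int), h[i]), (PySem.List.mem_enumerate_iff _ _ _).mpr ⟨i, hi, by simp⟩, hget, ?_⟩
    have hcast : ((i : Int) + 1) = ((i + 1 : Nat) : Int) := by push_cast; ring
    rw [hcast, PySem.List.slice_from_natCast]
    exact hP

-- ===== VERDICT (by name: the statement is the Claim_ definition above) =====
theorem host_allowed_py_spec : Claim_equal_host_allowed_py := by
  intro host allowlist _
  unfold Spec_host_allowed_py host_allowed_py host_allowed_py_alt
  rw [pvA_fold]
  simp only [List.nil_append]
  set h := PySem.Chars.lower host.toList with hh
  set pats := PySem.Set.discard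
    (PySem.Set.ofList (allowlist.map (fun item => PySem.Chars.lower (PySem.Chars.strip item.toList)))) []
    with hpats
  have hmem : ∀ x, x ∈ pats ↔ x ∈ pvNorm allowlist := fun x => pv_mem_pats allowlist x
  by_cases hnil : pvNorm allowlist = []
  · have hp0 : pats = [] := by
      rw [List.eq_nil_iff_forall_not_mem]
      intro x hx
      have := (hmem x).mp hx
      rw [hnil] at this
      simp at this
    simp [hnil, hp0]
  · obtain ⟨p, hpmem⟩ := List.exists_mem_of_ne_nil _ hnil
    have hpe : pats.isEmpty = false :=
      List.isEmpty_eq_false_iff.mpr (List.ne_nil_of_mem ((hmem p).mpr hpmem))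
    rw [if_neg hnil]
    simp only [hpe, Bool.false_eq_true, if_false]
    rw [Bool.eq_iff_iff]
    simp only [List.any_eq_true, Bool.if_true_left, Bool.or_eq_true, decide_eq_true_eq,
      PySem.Set.contains_iff, hmem, pv_slice_two,
      pv_enum_any (P := fun c => PySem.Set.contains pats c)]
    have heq : ∀ x : List Char,
        ((if PySem.Chars.startswith x ['*', '.'] = true
            then (h == x.drop 2 || PySem.Chars.endswith h ('.' :: x.drop 2))
            else h == x) = true)
        ↔ (if PySem.Chars.startswith x ['*', '.'] = true
            then (h = x.drop 2 ∨ ('.' :: x.drop 2) <:+ h)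
            else h = x) := by
      intro x
      by_cases hc : PySem.Chars.startswith x ['*', '.'] = true
      · simp [hc, PySem.Chars.endswith_iff]
      · simp [hc]
    simp only [heq]
    rw [pv_core]
    tauto
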